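-- pv_equiv track=rewrite | github.com/lizuojun/xasset | ref/House/house_sample.py | correct_unit_point
-- ===== SOURCE A (Python) =====
-- def correct_unit_point(point_list):
--     point_list_new = []
--     point_count = int(len(point_list) / 2)
--     for point_index in range(point_count):
--         x = point_list[point_index * 2 + 0]
--         y = -point_list[point_index * 2 + 1]
--         point_list_new.insert(0, y)
--         point_list_new.insert(0, x)
--     return point_list_new
-- ===== SOURCE B (Python) =====
-- def correct_unit_point(point_list):
--     it = iter(point_list)
--     pairs = list(zip(it, it))
--     out = []
--     for x, y in reversed(pairs):
--         out.append(x)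
--         out.append(-y)
--     return out
-- ===== Notes on version B (the rewrite author's own statement) =====
-- stated objective: faster
-- what changed: Replaced the indexed counting loop with its O(n^2) repeated insert(0, ...) front-inserts by one zip-pairing pass over an iterator followed by a reverse traversal of the pair list using O(1) appends.
import Mathlib
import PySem

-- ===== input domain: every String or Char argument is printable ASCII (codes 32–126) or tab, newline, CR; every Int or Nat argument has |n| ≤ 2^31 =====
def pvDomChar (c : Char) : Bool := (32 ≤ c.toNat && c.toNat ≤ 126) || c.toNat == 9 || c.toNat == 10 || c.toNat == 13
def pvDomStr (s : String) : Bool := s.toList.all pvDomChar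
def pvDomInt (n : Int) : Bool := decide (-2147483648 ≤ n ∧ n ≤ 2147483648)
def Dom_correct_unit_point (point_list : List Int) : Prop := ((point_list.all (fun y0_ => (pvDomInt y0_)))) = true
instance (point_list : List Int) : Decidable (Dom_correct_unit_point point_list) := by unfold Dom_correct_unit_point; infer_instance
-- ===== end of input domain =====

-- B replaces A's counting loop with its repeated front-inserts by one zip-pairing pass
-- followed by a reverse traversal with O(1) appends; same return value.

-- ===== PORT A =====
-- Literal port of A: point_count = int(len/2); for each index, read x and y by position
-- and insert them at the front of the accumulator (insert(0, v) on a Lean list is cons).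
-- Indices 2i and 2i+1 are always in range (i < len/2), so Python never raises here;
-- pyGetD with default 0 is exact on every reached index.
def correct_unit_point (point_list : List Int) : List Int :=
  let point_count : Nat := point_list.length / 2
  (List.range point_count).foldl
    (fun point_list_new point_index =>
      let x := PySem.List.pyGetD point_list ((point_index * 2 + 0 : Nat) : Int) 0
      let y := -(PySem.List.pyGetD point_list ((point_index * 2 + 1 : Nat) : Int) 0)
      x :: (y :: point_list_new))
    []

-- ===== PORT B =====
-- list(zip(it, it)) over one iterator pairs consecutive elements and drops a trailing
-- unpaired element — exactly this helper.
def pyPairs : List Int → List (Int × Int)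
  | x :: y :: rest => (x, y) :: pyPairs rest
  | _ => []

-- Literal port of Source B: pair up the elements, then fold over the reversed pair list,
-- appending x and then -y.
def correct_unit_point_alt (point_list : List Int) : List Int :=
  let pairs := pyPairs point_list
  pairs.reverse.foldl (fun out p => (out ++ [p.1]) ++ [-p.2]) []

-- ===== PRECONDITION & SPEC =====
def Spec_correct_unit_point (point_list : List Int) (out : List Int) : Prop := out = correct_unit_point_alt point_list
instance (point_list : List Int) (out : List Int) : Decidable (Spec_correct_unit_point point_list out) := by unfold Spec_correct_unit_point; infer_instance

-- ===== CLAIM (what is proved, stated in full; the proofs are below) =====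
def Claim_equal_correct_unit_point : Prop := ∀ (point_list : List Int), Dom_correct_unit_point point_list → Spec_correct_unit_point point_list (correct_unit_point point_list)

-- ===== LEMMAS AND PROOFS =====

-- Common normal form: reversed pair order, y negated (proof-only helper).
def pairFlip : List Int → List Int
  | x :: y :: rest => pairFlip rest ++ [x, -y]
  | _ => []

-- Appending one full pair behind an even-length prefix prepends (a, -b).
lemma pairFlip_append_pair (L : List Int) (a b : Int) (h : L.length % 2 = 0) :
    pairFlip (L ++ [a, b]) = a :: -b :: pairFlip L := by
  induction L using pairFlip.induct with
  | case1 x y rest ih =>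
      have : rest.length % 2 = 0 := by simp at h; omega
      simp [pairFlip, ih this]
  | case2 L hL =>
      match L with
      | [] => simp [pairFlip]
      | [c] => simp at h
      | x :: y :: rest => exact absurd rfl (hL x y rest)

-- A's loop after n iterations equals pairFlip on the first 2*n elements.
lemma foldl_eq_pairFlip_take (pl : List Int) (n : Nat) (hn : n ≤ pl.length / 2) :
    (List.range n).foldl
      (fun acc i =>
        PySem.List.pyGetD pl ((i * 2 + 0 : Nat) : Int) 0 ::
          (-(PySem.List.pyGetD pl ((i * 2 + 1 : Nat) : Int) 0) :: acc)) []
    = pairFlip (pl.take (2 * n)) := by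
  induction n with
  | zero => simp [pairFlip]
  | succ m ih =>
      have h1 : m * 2 < pl.length := by omega
      have h2 : m * 2 + 1 < pl.length := by omega
      rw [List.range_succ, List.foldl_append, ih (by omega)]
      have htake : pl.take (2 * (m + 1)) = pl.take (2 * m) ++ [pl[m * 2], pl[m * 2 + 1]] := by
        rw [show 2 * (m + 1) = m * 2 + 2 from by ring, show 2 * m = m * 2 from by ring,
            List.take_add, List.drop_eq_getElem_cons h1, List.drop_eq_getElem_cons h2]
        rfl
      have hlen : (pl.take (2 * m)).length % 2 = 0 := by
        simp [List.length_take]; omega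
      have g1 : PySem.List.pyGetD pl ((m * 2 + 0 : Nat) : Int) 0 = pl[m * 2] := by
        rw [PySem.List.pyGetD_natCast]
        simp [List.getD_eq_getElem?_getD, h1]
      have g2 : PySem.List.pyGetD pl ((m * 2 + 1 : Nat) : Int) 0 = pl[m * 2 + 1] := by
        rw [PySem.List.pyGetD_natCast]
        simp [List.getD_eq_getElem?_getD, h2]
      rw [htake, pairFlip_append_pair _ _ _ hlen]
      simp only [List.foldl_cons, List.foldl_nil, g1, g2]

-- pairFlip ignores a trailing unpaired element, exactly as A's count does.
lemma pairFlip_take_even (pl : List Int) :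
    pairFlip (pl.take (2 * (pl.length / 2))) = pairFlip pl := by
  induction pl using pairFlip.induct with
  | case1 x y rest ih =>
      have : 2 * ((x :: y :: rest).length / 2) = 2 * (rest.length / 2) + 2 := by
        simp; omega
      simp only [this, List.take_succ_cons, pairFlip, ih]
  | case2 L hL =>
      match L with
      | [] => rfl
      | [c] => simp [pairFlip]
      | x :: y :: rest => exact absurd rfl (hL x y rest)

-- B's port equals pairFlip.
lemma alt_eq_pairFlip (pl : List Int) : correct_unit_point_alt pl = pairFlip pl := by
  have hfun : (fun (out : List Int) (p : Int × Int) => (out ++ [p.1]) ++ [-p.2])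
      = fun out p => out ++ [p.1, -p.2] := by
    funext out p; simp
  show (pyPairs pl).reverse.foldl (fun out p => (out ++ [p.1]) ++ [-p.2]) [] = pairFlip pl
  rw [hfun, PySem.List.foldl_append_eq_flatMap]
  induction pl using pairFlip.induct with
  | case1 x y rest ih =>
      simp only [pyPairs, List.reverse_cons, List.flatMap_append, List.nil_append] at *
      simp [pairFlip, ih]
  | case2 L hL =>
      match L with
      | [] => rfl
      | [c] => rfl
      | x :: y :: rest => exact absurd rfl (hL x y rest)

-- ===== VERDICT (by name: the statement is the Claim_ definition above) =====
theorem correct_unit_point_spec : Claim_equal_correct_unit_point := by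
  intro pl _
  show correct_unit_point pl = correct_unit_point_alt pl
  unfold correct_unit_point
  rw [foldl_eq_pairFlip_take pl (pl.length / 2) le_rfl, pairFlip_take_even, alt_eq_pairFlip]
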